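-- pv_equiv track=rewrite | github.com/HaFred/leetcode.py | python/349_Intersection_of_Two_Arrays.py | getPlusSignCount
-- ===== SOURCE A (Python) =====
-- def getPlusSignCount(N, Len, Dir):
--     x, y = 0, 0  # 初始位置
--     up, down, left, right = set(), set(), set(), set()
--     plus_signs = 0
--
--     for L, D in zip(Len, Dir):
--         if D == 'U':
--             y_new = y + L
--             for i in range(y, y_new):
--                 up.add(i)
--             y = y_new
--         elif D == 'D':
--             y_new = y - L
--             for i in range(y, y_new, -1):
--                 down.add(i)
--             y = y_new
--         elif D == 'L':
--             x_new = x - L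
--             for i in range(x, x_new, -1):
--                 left.add(i)
--             x = x_new
--         elif D == 'R':
--             x_new = x + L
--             for i in range(x, x_new):
--                 right.add(i)
--             x = x_new
--
--             # 检查当前位置是否形成加号
--         if x in left and x in right and y in up and y in down:
--             plus_signs += 1
--
--     return plus_signs
-- ===== SOURCE B (Python) =====
-- def getPlusSignCount(N, Len, Dir):
--     # Intervals per direction instead of enumerating every integer coordinate.
--     x = y = 0
--     up, down, left, right = [], [], [], []
--     plus_signs = 0
--     for L, D in zip(Len, Dir):
--         if D == 'U':
--             up.append((y, y + L))       # covers [y, y+L)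
--             y += L
--         elif D == 'D':
--             down.append((y - L, y))     # covers (y-L, y]
--             y -= L
--         elif D == 'L':
--             left.append((x - L, x))     # covers (x-L, x]
--             x -= L
--         elif D == 'R':
--             right.append((x, x + L))    # covers [x, x+L)
--             x += L
--         if (any(a < x <= b for a, b in left)
--                 and any(a <= x < b for a, b in right)
--                 and any(a <= y < b for a, b in up)
--                 and any(a < y <= b for a, b in down)):
--             plus_signs += 1
--     return plus_signs
-- ===== Notes on version B (the rewrite author's own statement) =====
-- stated objective: alternative
-- what changed: B records each move as one half-open interval per direction and tests the current point by interval membership with any(), instead of inserting every integer coordinate of each move into per-direction hash sets; cost O(n^2) in the number of moves but independent of the move lengths.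
import Mathlib
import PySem

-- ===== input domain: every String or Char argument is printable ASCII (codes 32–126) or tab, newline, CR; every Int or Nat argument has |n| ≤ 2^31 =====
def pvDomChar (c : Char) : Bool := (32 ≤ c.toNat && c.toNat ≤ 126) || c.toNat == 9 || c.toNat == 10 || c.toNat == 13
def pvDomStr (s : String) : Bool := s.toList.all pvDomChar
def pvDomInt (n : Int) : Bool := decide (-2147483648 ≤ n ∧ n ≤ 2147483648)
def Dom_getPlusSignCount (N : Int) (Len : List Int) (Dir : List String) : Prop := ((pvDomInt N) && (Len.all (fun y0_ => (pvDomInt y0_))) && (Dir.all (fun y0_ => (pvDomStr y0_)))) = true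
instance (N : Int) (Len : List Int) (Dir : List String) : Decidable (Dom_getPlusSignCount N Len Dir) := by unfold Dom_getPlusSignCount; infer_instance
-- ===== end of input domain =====

-- B records each move as one half-open interval per direction and tests the current
-- point by interval membership, instead of inserting every covered integer into sets.


-- ===== PORT A =====
-- state: (x, y, up, down, left, right, plus_signs)
def pvAState : Type := Int × Int × PySem.Set Int × PySem.Set Int × PySem.Set Int × PySem.Set Int × Int

def pvAMove (st : pvAState) (LD : Int × String) : pvAState :=
  match st, LD with
  | (x, y, up, down, left, right, plus), (L, D) =>
    if D == "U" then
      let yn := y + L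
      (x, yn, (PySem.List.pyRange y yn 1).foldl (fun s i => PySem.Set.add s i) up, down, left, right, plus)
    else if D == "D" then
      let yn := y - L
      (x, yn, up, (PySem.List.pyRange y yn (-1)).foldl (fun s i => PySem.Set.add s i) down, left, right, plus)
    else if D == "L" then
      let xn := x - L
      (xn, y, up, down, (PySem.List.pyRange x xn (-1)).foldl (fun s i => PySem.Set.add s i) left, right, plus)
    else if D == "R" then
      let xn := x + L
      (xn, y, up, down, left, (PySem.List.pyRange x xn 1).foldl (fun s i => PySem.Set.add s i) right, plus)
    else (x, y, up, down, left, right, plus)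

def pvACheck (st : pvAState) : pvAState :=
  match st with
  | (x, y, up, down, left, right, plus) =>
    if PySem.Set.contains left x && PySem.Set.contains right x
        && PySem.Set.contains up y && PySem.Set.contains down y then
      (x, y, up, down, left, right, plus + 1)
    else
      (x, y, up, down, left, right, plus)

def pvAStep (st : pvAState) (LD : Int × String) : pvAState := pvACheck (pvAMove st LD)

def getPlusSignCount (N : Int) (Len : List Int) (Dir : List String) : Int :=
  ((Len.zip Dir).foldl pvAStep (0, 0, PySem.Set.empty, PySem.Set.empty, PySem.Set.empty, PySem.Set.empty, 0)).2.2.2.2.2.2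

-- ===== PORT B =====
-- state: (x, y, up, down, left, right, plus_signs) with interval lists
def pvBState : Type := Int × Int × List (Int × Int) × List (Int × Int) × List (Int × Int) × List (Int × Int) × Int

-- any(a <= v < b for a, b in l)
def pvMemHO (l : List (Int × Int)) (v : Int) : Bool := l.any (fun p => p.1 ≤ v && v < p.2)
-- any(a < v <= b for a, b in l)
def pvMemOH (l : List (Int × Int)) (v : Int) : Bool := l.any (fun p => p.1 < v && v ≤ p.2)

def pvBMove (st : pvBState) (LD : Int × String) : pvBState :=
  match st, LD with
  | (x, y, up, down, left, right, plus), (L, D) =>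
    if D == "U" then (x, y + L, up ++ [(y, y + L)], down, left, right, plus)
    else if D == "D" then (x, y - L, up, down ++ [(y - L, y)], left, right, plus)
    else if D == "L" then (x - L, y, up, down, left ++ [(x - L, x)], right, plus)
    else if D == "R" then (x + L, y, up, down, left, right ++ [(x, x + L)], plus)
    else (x, y, up, down, left, right, plus)

def pvBCheck (st : pvBState) : pvBState :=
  match st with
  | (x, y, up, down, left, right, plus) =>
    if pvMemOH left x && pvMemHO right x && pvMemHO up y && pvMemOH down y then
      (x, y, up, down, left, right, plus + 1)
    else
      (x, y, up, down, left, right, plus)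

def pvBStep (st : pvBState) (LD : Int × String) : pvBState := pvBCheck (pvBMove st LD)

def getPlusSignCount_alt (N : Int) (Len : List Int) (Dir : List String) : Int :=
  ((Len.zip Dir).foldl pvBStep (0, 0, [], [], [], [], 0)).2.2.2.2.2.2

-- ===== PRECONDITION & SPEC =====
def Spec_getPlusSignCount (N : Int) (Len : List Int) (Dir : List String) (out : Int) : Prop := out = getPlusSignCount_alt N Len Dir
instance (N : Int) (Len : List Int) (Dir : List String) (out : Int) : Decidable (Spec_getPlusSignCount N Len Dir out) := by unfold Spec_getPlusSignCount; infer_instance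

-- ===== CLAIM (what is proved, stated in full; the proofs are below) =====
def Claim_equal_getPlusSignCount : Prop := ∀ (N : Int) (Len : List Int) (Dir : List String), Dom_getPlusSignCount N Len Dir → Spec_getPlusSignCount N Len Dir (getPlusSignCount N Len Dir)

-- ===== LEMMAS AND PROOFS =====

-- the simulation relation between an A-state and a B-state
def pvRel (sa : pvAState) (sb : pvBState) : Prop :=
  sa.1 = sb.1 ∧ sa.2.1 = sb.2.1 ∧ sa.2.2.2.2.2.2 = sb.2.2.2.2.2.2 ∧
  (∀ v, v ∈ sa.2.2.1 ↔ pvMemHO sb.2.2.1 v = true) ∧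
  (∀ v, v ∈ sa.2.2.2.1 ↔ pvMemOH sb.2.2.2.1 v = true) ∧
  (∀ v, v ∈ sa.2.2.2.2.1 ↔ pvMemOH sb.2.2.2.2.1 v = true) ∧
  (∀ v, v ∈ sa.2.2.2.2.2.1 ↔ pvMemHO sb.2.2.2.2.2.1 v = true)

theorem pvMem_update_range_one (s : PySem.Set Int) (a b v : Int) :
    v ∈ (PySem.List.pyRange a b 1).foldl (fun s i => PySem.Set.add s i) s ↔ v ∈ s ∨ (a ≤ v ∧ v < b) := by
  have : (PySem.List.pyRange a b 1).foldl (fun s i => PySem.Set.add s i) s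
      = PySem.Set.update s (PySem.List.pyRange a b 1) := rfl
  rw [this, PySem.Set.mem_update, PySem.List.mem_pyRange_one]

theorem pvMem_update_range_neg_one (s : PySem.Set Int) (a b v : Int) :
    v ∈ (PySem.List.pyRange a b (-1)).foldl (fun s i => PySem.Set.add s i) s ↔ v ∈ s ∨ (b < v ∧ v ≤ a) := by
  have : (PySem.List.pyRange a b (-1)).foldl (fun s i => PySem.Set.add s i) s
      = PySem.Set.update s (PySem.List.pyRange a b (-1)) := rfl
  rw [this, PySem.Set.mem_update, PySem.List.mem_pyRange_neg_one]

theorem pvMemHO_append (l : List (Int × Int)) (a b v : Int) :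
    pvMemHO (l ++ [(a, b)]) v = (pvMemHO l v || (decide (a ≤ v) && decide (v < b))) := by
  simp [pvMemHO]

theorem pvMemOH_append (l : List (Int × Int)) (a b v : Int) :
    pvMemOH (l ++ [(a, b)]) v = (pvMemOH l v || (decide (a < v) && decide (v ≤ b))) := by
  simp [pvMemOH]

theorem pvContains_eq {s : PySem.Set Int} {l : List (Int × Int)}
    {f : List (Int × Int) → Int → Bool} (h : ∀ v, v ∈ s ↔ f l v = true) (v : Int) :
    PySem.Set.contains s v = f l v := by
  rcases hb : f l v with _ | _
  · simp only [PySem.Set.contains_eq_listContains]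
    simp [(h v).not, hb]
  · simp only [PySem.Set.contains_eq_listContains]
    simp [(h v).mpr hb]

theorem pvCheck_rel (sa : pvAState) (sb : pvBState) (h : pvRel sa sb) :
    pvRel (pvACheck sa) (pvBCheck sb) := by
  obtain ⟨ax, ay, au, ad, al, ar, ap⟩ := sa
  obtain ⟨bx, by_, bu, bd, bl, br, bp⟩ := sb
  obtain ⟨gx, gy, gp, gu, gd, gl, gr⟩ := h
  simp only at gx gy gp gu gd gl gr
  subst gx gy gp
  simp only [pvACheck, pvBCheck, pvContains_eq gl ax, pvContains_eq gr ax,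
    pvContains_eq gu ay, pvContains_eq gd ay]
  split
  · exact ⟨rfl, rfl, rfl, gu, gd, gl, gr⟩
  · exact ⟨rfl, rfl, rfl, gu, gd, gl, gr⟩

theorem pvMove_rel (sa : pvAState) (sb : pvBState) (h : pvRel sa sb) (LD : Int × String) :
    pvRel (pvAMove sa LD) (pvBMove sb LD) := by
  obtain ⟨x, y, up, down, left, right, plus⟩ := sa
  obtain ⟨x', y', up', down', left', right', plus'⟩ := sb
  obtain ⟨hx, hy, hp, hu, hd, hl, hr⟩ := h
  simp only at hx hy hp hu hd hl hr
  subst hx hy hp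
  obtain ⟨L, D⟩ := LD
  simp only [pvAMove, pvBMove]
  by_cases hU : D = "U"
  · subst hU; simp only [beq_self_eq_true, if_pos]
    refine ⟨rfl, rfl, rfl, ?_, hd, hl, hr⟩
    intro v
    simp only [pvMem_update_range_one, pvMemHO_append, hu v]
    constructor
    · rintro (h1 | ⟨h1, h2⟩) <;> simp_all
    · intro h1; rcases Bool.or_eq_true_iff.mp h1 with h2 | h2
      · exact Or.inl h2
      · right; constructor <;> simp_all
  by_cases hD : D = "D"
  · subst hD
    have hne : ("D" == "U") = false := by decide
    simp only [hne, beq_self_eq_true, Bool.false_eq_true, if_false, if_pos]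
    refine ⟨rfl, rfl, rfl, hu, ?_, hl, hr⟩
    intro v
    simp only [pvMem_update_range_neg_one, pvMemOH_append, hd v]
    constructor
    · rintro (h1 | ⟨h1, h2⟩) <;> simp_all
    · intro h1; rcases Bool.or_eq_true_iff.mp h1 with h2 | h2
      · exact Or.inl h2
      · right; constructor <;> simp_all
  by_cases hL : D = "L"
  · subst hL
    have h1 : ("L" == "U") = false := by decide
    have h2 : ("L" == "D") = false := by decide
    simp only [h1, h2, beq_self_eq_true, Bool.false_eq_true, if_false, if_pos]
    refine ⟨rfl, rfl, rfl, hu, hd, ?_, hr⟩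
    intro v
    simp only [pvMem_update_range_neg_one, pvMemOH_append, hl v]
    constructor
    · rintro (h3 | ⟨h3, h4⟩) <;> simp_all
    · intro h3; rcases Bool.or_eq_true_iff.mp h3 with h4 | h4
      · exact Or.inl h4
      · right; constructor <;> simp_all
  by_cases hR : D = "R"
  · subst hR
    have h1 : ("R" == "U") = false := by decide
    have h2 : ("R" == "D") = false := by decide
    have h3 : ("R" == "L") = false := by decide
    simp only [h1, h2, h3, beq_self_eq_true, Bool.false_eq_true, if_false, if_pos]
    refine ⟨rfl, rfl, rfl, hu, hd, hl, ?_⟩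
    intro v
    simp only [pvMem_update_range_one, pvMemHO_append, hr v]
    constructor
    · rintro (h4 | ⟨h4, h5⟩) <;> simp_all
    · intro h4; rcases Bool.or_eq_true_iff.mp h4 with h5 | h5
      · exact Or.inl h5
      · right; constructor <;> simp_all
  · have h1 : (D == "U") = false := by simp [hU]
    have h2 : (D == "D") = false := by simp [hD]
    have h3 : (D == "L") = false := by simp [hL]
    have h4 : (D == "R") = false := by simp [hR]
    simp only [h1, h2, h3, h4, Bool.false_eq_true, if_false]
    exact ⟨rfl, rfl, rfl, hu, hd, hl, hr⟩

theorem pvStep_rel (sa : pvAState) (sb : pvBState) (h : pvRel sa sb) (LD : Int × String) :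
    pvRel (pvAStep sa LD) (pvBStep sb LD) :=
  pvCheck_rel _ _ (pvMove_rel sa sb h LD)

theorem pvFold_rel (l : List (Int × String)) (sa : pvAState) (sb : pvBState) (h : pvRel sa sb) :
    pvRel (l.foldl pvAStep sa) (l.foldl pvBStep sb) := by
  induction l generalizing sa sb with
  | nil => exact h
  | cons hd tl ih => exact ih _ _ (pvStep_rel sa sb h hd)

-- ===== VERDICT (by name: the statement is the Claim_ definition above) =====
theorem getPlusSignCount_spec : Claim_equal_getPlusSignCount := by
  intro N Len Dir _
  unfold Spec_getPlusSignCount getPlusSignCount getPlusSignCount_alt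
  have h0 : pvRel (0, 0, PySem.Set.empty, PySem.Set.empty, PySem.Set.empty, PySem.Set.empty, 0)
      ((0, 0, [], [], [], [], 0) : pvBState) := by
    refine ⟨rfl, rfl, rfl, ?_, ?_, ?_, ?_⟩ <;> intro v <;> simp [pvMemHO, pvMemOH, PySem.Set.empty]
  exact (pvFold_rel (Len.zip Dir) _ _ h0).2.2.1
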